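-- pv_equiv track=rewrite | github.com/bensonchoyintuitas/tsql_to_databricks | convert_tsql_to_databricks.py | convert_brackets
-- ===== SOURCE A (Python) =====
-- def convert_brackets(sql):
--     # Convert square brackets to backticks, but not within DBT tags or config blocks
--     in_dbt = False
--     result = ""
--     i = 0
--
--     while i < len(sql):
--         if sql[i:i+2] == '{{':
--             in_dbt = True
--             result += sql[i:i+2]
--             i += 2
--         elif sql[i:i+2] == '}}':
--             in_dbt = False
--             result += sql[i:i+2]
--             i += 2
--         elif not in_dbt and sql[i] == '[':
--             result += '`'
--             i += 1
--         elif not in_dbt and sql[i] == ']':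
--             result += '`'
--             i += 1
--         else:
--             result += sql[i]
--             i += 1
--
--     return result
-- ===== SOURCE B (Python) =====
-- def convert_brackets(sql):
--     # Segment-based: find DBT tag boundaries and bulk-replace whole outside segments.
--     parts = []
--     i = 0
--     while True:
--         start = sql.find('{{', i)
--         if start == -1:
--             parts.append(sql[i:].replace('[', '`').replace(']', '`'))
--             break
--         parts.append(sql[i:start].replace('[', '`').replace(']', '`'))
--         end = sql.find('}}', start + 2)
--         if end == -1:
--             parts.append(sql[start:])
--             break
--         parts.append(sql[start:end + 2])
--         i = end + 2
--     return ''.join(parts)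
-- ===== Notes on version B (the rewrite author's own statement) =====
-- stated objective: faster
-- what changed: Replaces the per-character in_dbt state machine with a segment scanner that locates '{{'/'}}' boundaries via str.find and bulk-replaces brackets in whole outside segments with str.replace, joining the parts at the end.
import Mathlib
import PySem

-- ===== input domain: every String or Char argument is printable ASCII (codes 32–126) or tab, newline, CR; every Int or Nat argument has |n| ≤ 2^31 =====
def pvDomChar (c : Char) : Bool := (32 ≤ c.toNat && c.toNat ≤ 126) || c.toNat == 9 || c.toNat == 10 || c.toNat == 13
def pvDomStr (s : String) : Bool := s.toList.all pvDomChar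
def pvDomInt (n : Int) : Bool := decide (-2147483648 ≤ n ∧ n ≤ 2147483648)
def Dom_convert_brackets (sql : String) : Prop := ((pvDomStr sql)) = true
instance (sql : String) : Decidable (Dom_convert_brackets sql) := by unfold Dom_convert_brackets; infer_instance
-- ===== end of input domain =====

-- B replaces A's per-character in_dbt state machine by a segment scanner (find tag
-- boundaries, bulk-replace whole outside segments); return values proved equal.

-- ===== PORT A =====
-- A's while-loop over positions, carrying the in_dbt flag; two-char lookahead
-- sql[i:i+2] becomes pattern matching on the next two list elements.
def goA : Bool → List Char → List Char
  | _, [] => []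
  | b, [c] => (if b = false ∧ (c = '[' ∨ c = ']') then '`' else c) :: []
  | b, c :: d :: rest =>
    if c = '{' ∧ d = '{' then c :: d :: goA true rest
    else if c = '}' ∧ d = '}' then c :: d :: goA false rest
    else (if b = false ∧ (c = '[' ∨ c = ']') then '`' else c) :: goA b (d :: rest)

def convert_brackets (sql : String) : String := String.mk (goA false sql.toList)

-- ===== PORT B =====
-- `s.find(aa, i)` + the slices around it, as one helper: splits s at the first
-- occurrence of the two-char pattern a,a into (before, after-the-pattern); none = -1.
def findTag (a : Char) : List Char → Option (List Char × List Char)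
  | [] => none
  | c :: rest =>
    if c = a ∧ rest.head? = some a then some ([], rest.tail)
    else (findTag a rest).map (fun p => (c :: p.1, p.2))

-- segment.replace('[','`').replace(']','`')
def repl (c : Char) : Char := if c = '[' ∨ c = ']' then '`' else c

theorem findTag_length {a : Char} : ∀ {s p q : List Char}, findTag a s = some (p, q) →
    s.length = p.length + q.length + 2 := by
  intro s
  induction s with
  | nil => intro p q h; simp [findTag] at h
  | cons c rest ih =>
    intro p q h
    simp only [findTag] at h
    split at h
    · rename_i hc
      cases h
      cases rest with
      | nil => simp at hc
      | cons d r2 => simp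
    · simp only [Option.map_eq_some_iff] at h
      obtain ⟨⟨p', q'⟩, hp, he⟩ := h
      cases he
      have := ih hp
      simp only [List.length_cons]
      omega

def goB (s : List Char) : List Char :=
  match h1 : findTag '{' s with
  | none => s.map repl
  | some (pre, tail) =>
    pre.map repl ++ '{' :: '{' ::
      (match h2 : findTag '}' tail with
       | none => tail
       | some (mid, t2) => mid ++ '}' :: '}' :: goB t2)
termination_by s.length
decreasing_by
  have l1 := findTag_length h1
  have l2 := findTag_length h2
  omega

def convert_brackets_alt (sql : String) : String := String.mk (goB sql.toList)

-- ===== PRECONDITION & SPEC =====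
def Spec_convert_brackets (sql : String) (out : String) : Prop := out = convert_brackets_alt sql
instance (sql : String) (out : String) : Decidable (Spec_convert_brackets sql out) := by unfold Spec_convert_brackets; infer_instance

-- ===== CLAIM (what is proved, stated in full; the proofs are below) =====
def Claim_equal_convert_brackets : Prop := ∀ (sql : String), Dom_convert_brackets sql → Spec_convert_brackets sql (convert_brackets sql)

-- ===== LEMMAS AND PROOFS =====


theorem findTag_cons (a c : Char) (rest : List Char) (h : ¬(c = a ∧ rest.head? = some a)) :
    findTag a (c :: rest) = (findTag a rest).map (fun p => (c :: p.1, p.2)) := by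
  rw [findTag, if_neg h]

-- In not-in_dbt mode A maps repl over everything up to the first '{{' (which flips the flag).
theorem falseChar : ∀ (n : Nat) (s : List Char), s.length ≤ n → goA false s =
    (match findTag '{' s with
     | none => s.map repl
     | some (pre, tail) => pre.map repl ++ '{' :: '{' :: goA true tail) := by
  intro n
  induction n with
  | zero =>
    intro s hs
    have : s = [] := by cases s with | nil => rfl | cons a b => simp at hs
    subst this; simp [goA, findTag]
  | succ n ih =>
    intro s hs
    match s with
    | [] => simp [goA, findTag]
    | [c] => simp [goA, findTag, repl]
    | c :: d :: rest =>
      by_cases hoc : c = '{' ∧ d = '{'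
      · obtain ⟨h1, h2⟩ := hoc; subst h1; subst h2
        simp [goA, findTag]
      · by_cases hcc : c = '}' ∧ d = '}'
        · obtain ⟨h1, h2⟩ := hcc; subst h1; subst h2
          have hr : rest.length ≤ n := by simp at hs; omega
          rw [show goA false ('}' :: '}' :: rest) = '}' :: '}' :: goA false rest from by
            simp [goA]]
          rw [ih rest hr]
          rw [show findTag '{' ('}' :: '}' :: rest)
              = (findTag '{' rest).map (fun p => ('}' :: '}' :: p.1, p.2)) from by
            simp [findTag]; cases h : findTag '{' rest <;> simp]
          cases h : findTag '{' rest with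
          | none => simp [repl]
          | some p => obtain ⟨pre, tl⟩ := p; simp [repl]
        · have hr : (d :: rest).length ≤ n := by simp at hs ⊢; omega
          have hgoA : goA false (c :: d :: rest) = repl c :: goA false (d :: rest) := by
            simp only [goA, if_neg hoc, if_neg hcc, repl]; simp
          rw [hgoA, ih (d :: rest) hr]
          rw [findTag_cons '{' c (d :: rest)
            (by simp only [List.head?_cons, Option.some.injEq]; exact hoc)]
          cases h : findTag '{' (d :: rest) with
          | none => simp
          | some p => obtain ⟨pre, tl⟩ := p; simp

-- In in_dbt mode A copies everything verbatim up to the first '}}' (which flips the flag back).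
theorem trueChar : ∀ (n : Nat) (t : List Char), t.length ≤ n → goA true t =
    (match findTag '}' t with
     | none => t
     | some (mid, t2) => mid ++ '}' :: '}' :: goA false t2) := by
  intro n
  induction n with
  | zero =>
    intro t ht
    have : t = [] := by cases t with | nil => rfl | cons a b => simp at ht
    subst this; simp [goA, findTag]
  | succ n ih =>
    intro t ht
    match t with
    | [] => simp [goA, findTag]
    | [c] => simp [goA, findTag]
    | c :: d :: rest =>
      by_cases hcc : c = '}' ∧ d = '}'
      · obtain ⟨h1, h2⟩ := hcc; subst h1; subst h2
        simp [goA, findTag]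
      · by_cases hoc : c = '{' ∧ d = '{'
        · obtain ⟨h1, h2⟩ := hoc; subst h1; subst h2
          have hr : rest.length ≤ n := by simp at ht; omega
          rw [show goA true ('{' :: '{' :: rest) = '{' :: '{' :: goA true rest from by
            simp [goA]]
          rw [ih rest hr]
          rw [show findTag '}' ('{' :: '{' :: rest)
              = (findTag '}' rest).map (fun p => ('{' :: '{' :: p.1, p.2)) from by
            simp [findTag]; cases h : findTag '}' rest <;> simp]
          cases h : findTag '}' rest with
          | none => simp
          | some p => obtain ⟨mid, t2⟩ := p; simp
        · have hr : (d :: rest).length ≤ n := by simp at ht ⊢; omega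
          have hgoA : goA true (c :: d :: rest) = c :: goA true (d :: rest) := by
            simp only [goA, if_neg hoc, if_neg hcc]; simp
          rw [hgoA, ih (d :: rest) hr]
          rw [findTag_cons '}' c (d :: rest)
            (by simp only [List.head?_cons, Option.some.injEq]; exact hcc)]
          cases h : findTag '}' (d :: rest) with
          | none => simp
          | some p => obtain ⟨mid, t2⟩ := p; simp

theorem goA_goB_n : ∀ (n : Nat) (s : List Char), s.length ≤ n → goA false s = goB s := by
  intro n
  induction n with
  | zero =>
    intro s hs
    have : s = [] := by cases s with | nil => rfl | cons a b => simp at hs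
    subst this; simp [goA, goB, findTag]
  | succ n ih =>
    intro s hs
    rw [falseChar s.length s le_rfl, goB.eq_def]
    cases h1 : findTag '{' s with
    | none => simp
    | some p =>
      obtain ⟨pre, tail⟩ := p
      dsimp only
      rw [trueChar tail.length tail le_rfl]
      cases h2 : findTag '}' tail with
      | none => rfl
      | some q =>
        obtain ⟨mid, t2⟩ := q
        have l1 := findTag_length h1
        have l2 := findTag_length h2
        have : t2.length ≤ n := by omega
        simp [ih t2 this]

theorem goA_goB (s : List Char) : goA false s = goB s := goA_goB_n s.length s le_rfl


-- ===== VERDICT (by name: the statement is the Claim_ definition above) =====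
theorem convert_brackets_spec : Claim_equal_convert_brackets := by
  intro sql _
  unfold Spec_convert_brackets convert_brackets convert_brackets_alt
  rw [goA_goB]
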